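-- pv_equiv track=rewrite | github.com/IsrakAyasin/cos-125 | C/c/t.py | changeToQuestion
-- ===== SOURCE A (Python) =====
-- def changeToQuestion(myStr):
--     newStr =""
--     for i in range(len(myStr)):
--         if i%2 == 0:
--             newStr = newStr + '?'
--         else:
--             newStr =newStr + myStr[i]
--     return newStr
-- ===== SOURCE B (Python) =====
-- def changeToQuestion(myStr):
--     out = []
--     it = iter(myStr)
--     for _ in it:
--         out.append('?')
--         d = next(it, None)
--         if d is not None:
--             out.append(d)
--     return ''.join(out)
-- ===== Notes on version B (the rewrite author's own statement) =====
-- stated objective: alternative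
-- what changed: B consumes the string pairwise with an iterator (emit '?' then copy the next char if any) into a list joined once, instead of A's index loop with a parity test and repeated string concatenation.
import Mathlib
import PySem

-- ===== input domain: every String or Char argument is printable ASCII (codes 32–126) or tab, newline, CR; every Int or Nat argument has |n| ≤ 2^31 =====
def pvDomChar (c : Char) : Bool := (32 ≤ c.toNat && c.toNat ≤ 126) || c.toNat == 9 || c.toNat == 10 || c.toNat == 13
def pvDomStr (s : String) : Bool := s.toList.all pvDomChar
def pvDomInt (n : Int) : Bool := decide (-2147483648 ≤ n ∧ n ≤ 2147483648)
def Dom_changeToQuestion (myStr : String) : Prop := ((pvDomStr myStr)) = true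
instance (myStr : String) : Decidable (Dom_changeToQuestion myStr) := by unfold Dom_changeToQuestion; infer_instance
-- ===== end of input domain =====

-- B replaces A's index loop + parity branch + repeated string concatenation by a pairwise
-- iterator consumption collected into a list and joined once (objective: alternative).

-- ===== PORT A =====
-- literal port of A: for i in range(len(myStr)): if i%2==0 append '?' else append myStr[i]
-- A's loop body (if i%2==0: newStr+'?' else: newStr+myStr[i]); none is unreachable: i is a valid index
def changeToQuestionStep (cs : List Char) (newStr : String) (i : Int) : String :=
  if i % 2 == 0 then newStr ++ "?"
  else newStr ++ (match PySem.List.pyGet? cs i with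
    | some c => String.ofList [c]
    | none => "")

def changeToQuestion (myStr : String) : String :=
  let cs := myStr.toList
  (PySem.List.pyRange 0 (cs.length : Int) 1).foldl (changeToQuestionStep cs) ""

-- ===== PORT B =====
-- port of Source B's loop: each pass through the iterator consumes the next char (emits '?'),
-- then tries to consume one more (copies it); the collected list is joined at the end
def changeToQuestionGo : List Char → List Char
  | [] => []
  | _ :: rest =>
    match rest with
    | [] => ['?']
    | d :: rest' => '?' :: d :: changeToQuestionGo rest'

def changeToQuestion_alt (myStr : String) : String :=
  String.ofList (changeToQuestionGo myStr.toList)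

-- ===== PRECONDITION & SPEC =====
def Spec_changeToQuestion (myStr : String) (out : String) : Prop := out = changeToQuestion_alt myStr
instance (myStr : String) (out : String) : Decidable (Spec_changeToQuestion myStr out) := by unfold Spec_changeToQuestion; infer_instance

-- ===== CLAIM (what is proved, stated in full; the proofs are below) =====
def Claim_equal_changeToQuestion : Prop := ∀ (myStr : String), Dom_changeToQuestion myStr → Spec_changeToQuestion myStr (changeToQuestion myStr)

-- ===== LEMMAS AND PROOFS =====

lemma changeToQuestionGo_drop (full : List Char) (k : Nat) (hk : k ≤ full.length)
    (hpar : k % 2 = 0) (s : String) :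
    (PySem.List.pyRange (k : Int) (full.length : Int) 1).foldl (changeToQuestionStep full) s
      = s ++ String.ofList (changeToQuestionGo (full.drop k)) := by
  obtain ⟨n, hn⟩ : ∃ n, full.length - k = n := ⟨_, rfl⟩
  induction n using Nat.strong_induction_on generalizing k s with
  | _ n ih =>
  rcases Nat.eq_or_lt_of_le hk with heq | hlt
  · rw [heq, PySem.List.pyRange_one_eq_nil (le_refl _)]
    simp [changeToQuestionGo]
  · have hkE : ((k : Int) % 2 == 0) = true := by
      have : (k : Int) % 2 = 0 := by omega
      simp [this]
    rw [PySem.List.pyRange_one_cons (by exact_mod_cast hlt)]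
    simp only [List.foldl_cons, changeToQuestionStep, hkE, if_pos]
    rcases Nat.eq_or_lt_of_le hlt with heq1 | hlt1
    · -- k+1 = full.length : one trailing character
      have hrange : PySem.List.pyRange ((k : Int) + 1) (full.length : Int) 1 = [] := by
        apply PySem.List.pyRange_one_eq_nil; omega
      have hdrop : full.drop k = [full[k]] := by
        rw [List.drop_eq_getElem_cons hlt]
        have : full.drop (k + 1) = [] := by
          apply List.drop_eq_nil_of_le; omega
        rw [this]
      rw [hrange, hdrop]
      simp [changeToQuestionGo]
    · -- at least two characters remain
      rw [PySem.List.pyRange_one_cons (by exact_mod_cast hlt1)]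
      have hoddE : (((k : Int) + 1) % 2 == 0) = false := by
        have : ((k : Int) + 1) % 2 = 1 := by omega
        simp [this]
      have hget : PySem.List.pyGet? full ((k : Int) + 1) = some full[k + 1] := by
        have : ((k : Int) + 1) = ((k + 1 : Nat) : Int) := by push_cast; ring
        rw [this, PySem.List.pyGet?_ofNat full (k + 1) hlt1]
      simp only [List.foldl_cons, changeToQuestionStep, hoddE, Bool.false_eq_true,
        if_false, hget]
      have hrec := ih (n - 2) (by omega) (k + 2) (by omega) (by omega)
        (s ++ "?" ++ String.ofList [full[k + 1]]) (by omega)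
      rw [show (((k : Int)) + 1 + 1) = ((k + 2 : Nat) : Int) by push_cast; ring, hrec]
      have hdrop : full.drop k = full[k] :: full[k + 1] :: full.drop (k + 2) := by
        rw [List.drop_eq_getElem_cons hlt, List.drop_eq_getElem_cons hlt1]
      rw [hdrop]
      simp [changeToQuestionGo, String.append_assoc]
      rw [show ('?' :: full[k + 1] :: changeToQuestionGo (List.drop (k + 2) full))
            = ['?'] ++ [full[k + 1]] ++ changeToQuestionGo (List.drop (k + 2) full) from rfl,
          String.ofList_append, String.ofList_append]
      rfl

theorem changeToQuestion_spec : Claim_equal_changeToQuestion := by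
  intro myStr _
  unfold Spec_changeToQuestion changeToQuestion changeToQuestion_alt
  have h := changeToQuestionGo_drop myStr.toList 0 (Nat.zero_le _) rfl ""
  simpa using h
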